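-- pv_equiv track=rewrite | github.com/krishjainm/miscalibrated-belief-llms | newRepOpenAI/finalRepOpenAI/communication_protocols.py | should_filter_message
-- ===== SOURCE A (Python) =====
-- from typing import Dict, List, Any, Optional
--
-- def should_filter_message(
--     message: str,
--     sender_id: int,
--     teammate_ids: List[int],
--     opponents: List[int]
-- ) -> bool:
--     """
--     Determine if a message should be filtered from opponents.
--
--     Args:
--         message: The message content
--         sender_id: ID of message sender
--         teammate_ids: List of teammate IDs
--         opponents: List of opponent IDs
--
--     Returns:
--         True if message should be hidden from opponents
--     """
--     # In real implementation, could use more sophisticated filtering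
--     # For now, just check if message mentions teammate IDs
--     message_lower = message.lower()
--
--     for teammate_id in teammate_ids:
--         if f"player {teammate_id}" in message_lower:
--             return True
--
--     return False
-- ===== SOURCE B (Python) =====
-- def should_filter_message(
--     message: str,
--     sender_id: int,
--     teammate_ids,
--     opponents
-- ) -> bool:
--     # Single left-to-right scan: at each position where the lowered message
--     # starts with "player ", check whether the following characters spell one
--     # of the teammate ids (hash-set lookup per distinct id length) instead of
--     # one substring search per teammate.
--     ids = set()
--     for t in teammate_ids:
--         ids.add(str(t))
--     lens = set()
--     for w in ids:
--         lens.add(len(w))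
--     chars = message.lower()
--     for i in range(len(chars)):
--         if chars.startswith("player ", i):
--             rest = chars[i + 7:]
--             for L in lens:
--                 if rest[:L] in ids:
--                     return True
--     return False
-- ===== Notes on version B (the rewrite author's own statement) =====
-- stated objective: faster
-- what changed: Instead of one substring search over the message per teammate id, B scans the lowered message once for occurrences of "player " and checks the following characters against a hash set of the teammate-id strings (one lookup per distinct id length), removing the per-teammate pass.
import Mathlib
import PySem

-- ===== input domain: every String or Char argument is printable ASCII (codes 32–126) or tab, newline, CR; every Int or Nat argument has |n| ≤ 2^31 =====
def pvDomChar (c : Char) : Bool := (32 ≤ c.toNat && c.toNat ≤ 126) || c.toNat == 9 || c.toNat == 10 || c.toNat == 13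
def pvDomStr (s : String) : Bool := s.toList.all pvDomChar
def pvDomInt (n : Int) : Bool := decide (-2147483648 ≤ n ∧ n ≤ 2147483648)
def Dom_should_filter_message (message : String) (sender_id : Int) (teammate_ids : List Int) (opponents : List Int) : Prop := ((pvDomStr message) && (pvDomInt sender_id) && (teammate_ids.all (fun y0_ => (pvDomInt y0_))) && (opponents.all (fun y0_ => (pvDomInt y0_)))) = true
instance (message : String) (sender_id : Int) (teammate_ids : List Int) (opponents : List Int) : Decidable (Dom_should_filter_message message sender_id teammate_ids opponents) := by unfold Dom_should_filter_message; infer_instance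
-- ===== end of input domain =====

-- B replaces A's per-teammate substring search by a single scan of the lowered
-- message for "player " occurrences with set lookups of the id strings (faster).

-- ===== PORT A =====
def should_filter_message (message : String) (sender_id : Int) (teammate_ids : List Int) (opponents : List Int) : Bool :=
  let message_lower := PySem.Str.lower message
  -- 'for teammate_id in teammate_ids: if pat in message_lower: return True / return False' = any;
  -- f"player {teammate_id}" is string concatenation with str(teammate_id)
  teammate_ids.any fun teammate_id =>
    PySem.Str.isIn ("player " ++ PySem.Int.toStr teammate_id) message_lower

-- ===== PORT B =====
def should_filter_message_alt (message : String) (sender_id : Int) (teammate_ids : List Int) (opponents : List Int) : Bool :=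
  let ids : PySem.Set String :=
    teammate_ids.foldl (fun s t => PySem.Set.add s (PySem.Int.toStr t)) PySem.Set.empty
  let lens : PySem.Set Int :=
    ids.foldl (fun s w => PySem.Set.add s (PySem.Str.len w)) PySem.Set.empty
  let chars := PySem.Str.lower message
  -- 'for i in range(len(chars)):' over the nonnegative indices = List.range;
  -- 'chars.startswith("player ", i)' with 0 ≤ i is exactly startswith on the i-dropped code points
  (List.range chars.toList.length).any fun i =>
    PySem.Chars.startswith (chars.toList.drop i) "player ".toList &&
    (let rest := PySem.Str.slice chars (some ((i : Int) + 7)) none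
     lens.any fun L => PySem.Set.contains ids (PySem.Str.slice rest none (some L)))

-- ===== PRECONDITION & SPEC =====
def Spec_should_filter_message (message : String) (sender_id : Int) (teammate_ids : List Int) (opponents : List Int) (out : Bool) : Prop := out = should_filter_message_alt message sender_id teammate_ids opponents
instance (message : String) (sender_id : Int) (teammate_ids : List Int) (opponents : List Int) (out : Bool) : Decidable (Spec_should_filter_message message sender_id teammate_ids opponents out) := by unfold Spec_should_filter_message; infer_instance

-- ===== CLAIM (what is proved, stated in full; the proofs are below) =====
def Claim_equal_should_filter_message : Prop := ∀ (message : String) (sender_id : Int) (teammate_ids : List Int) (opponents : List Int), Dom_should_filter_message message sender_id teammate_ids opponents → Spec_should_filter_message message sender_id teammate_ids opponents (should_filter_message message sender_id teammate_ids opponents)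

-- ===== LEMMAS AND PROOFS =====

theorem pv_append_prefix_iff (a b l : List Char) :
    a ++ b <+: l ↔ a <+: l ∧ b <+: l.drop a.length := by
  constructor
  · rintro ⟨v, rfl⟩
    refine ⟨(List.prefix_append a b).trans (List.prefix_append _ v), ?_⟩
    rw [List.append_assoc, List.drop_left]
    exact List.prefix_append b v
  · rintro ⟨ha, hb⟩
    have hl : l = a ++ l.drop a.length := by
      conv_lhs => rw [← List.take_append_drop a.length l]
      rw [(List.prefix_iff_eq_take.mp ha).symm]
    rw [hl]
    exact (List.prefix_append_right_inj a).mpr hb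

theorem pv_infix_iff_exists_drop (l s : List Char) :
    l <:+: s ↔ ∃ i, l <+: s.drop i := by
  constructor
  · rintro ⟨u, v, rfl⟩
    exact ⟨u.length, by rw [List.append_assoc, List.drop_left]; exact List.prefix_append l v⟩
  · rintro ⟨i, h⟩
    exact h.isInfix.trans (List.drop_suffix i s).isInfix

theorem pv_drop_player (i : Nat) (s : List Char) :
    List.drop ("player ".toList.length) (List.drop i s) = List.drop (i+7) s := by
  rw [List.drop_drop]; congr 1

theorem pv_key (tm : List Int) (chars : String) :
    (tm.any fun t => PySem.Str.isIn ("player " ++ PySem.Int.toStr t) chars)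
    = ((List.range chars.toList.length).any fun i =>
        PySem.Chars.startswith (chars.toList.drop i) "player ".toList &&
        ((tm.foldl (fun s t => PySem.Set.add s (PySem.Int.toStr t)) PySem.Set.empty).foldl
            (fun s w => PySem.Set.add s (PySem.Str.len w)) PySem.Set.empty).any
          fun L => PySem.Set.contains
            (tm.foldl (fun s t => PySem.Set.add s (PySem.Int.toStr t)) PySem.Set.empty)
            (PySem.Str.slice (PySem.Str.slice chars (some ((i:Int) + 7)) none) none (some L))) := by
  set s : List Char := chars.toList with hs
  set ids := tm.foldl (fun s t => PySem.Set.add s (PySem.Int.toStr t)) PySem.Set.empty with hidsdef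
  set lens := ids.foldl (fun s w => PySem.Set.add s (PySem.Str.len w)) PySem.Set.empty with hlensdef
  have hidmem : ∀ x : String, x ∈ ids ↔ ∃ t ∈ tm, x = PySem.Int.toStr t := by
    intro x
    rw [hidsdef, ← PySem.Set.update_map_eq_foldl_add, PySem.Set.update_empty, PySem.Set.mem_ofList, List.mem_map]
    constructor
    · rintro ⟨t, ht, rfl⟩; exact ⟨t, ht, rfl⟩
    · rintro ⟨t, ht, rfl⟩; exact ⟨t, ht, rfl⟩
  have hlenmem : ∀ L : Int, L ∈ lens ↔ ∃ t ∈ tm, L = PySem.Str.len (PySem.Int.toStr t) := by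
    intro L
    rw [hlensdef, ← PySem.Set.update_map_eq_foldl_add, PySem.Set.update_empty, PySem.Set.mem_ofList, List.mem_map]
    constructor
    · rintro ⟨w, hw, rfl⟩
      obtain ⟨t, ht, rfl⟩ := (hidmem w).mp hw
      exact ⟨t, ht, rfl⟩
    · rintro ⟨t, ht, rfl⟩
      exact ⟨PySem.Int.toStr t, (hidmem _).mpr ⟨t, ht, rfl⟩, rfl⟩
  have hslice : ∀ (i : Nat) (t : Int),
      (PySem.Str.slice (PySem.Str.slice chars (some ((i:Int)+7)) none) none (some (PySem.Str.len (PySem.Int.toStr t)))).toList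
        = (s.drop (i+7)).take (PySem.Int.toChars t).length := by
    intro i t
    have h7 : ((i:Int)+7) = ((i+7 : Nat) : Int) := by push_cast; ring
    have hlen : PySem.Str.len (PySem.Int.toStr t) = ((PySem.Int.toChars t).length : Int) := by
      simp [pysem]
    rw [PySem.Str.toList_slice, PySem.Chars.slice_eq_listSlice, hlen,
      PySem.List.slice_to, Int.toNat_natCast,
      PySem.Str.toList_slice, PySem.Chars.slice_eq_listSlice, h7,
      PySem.List.slice_from_natCast]
    positivity
  rw [Bool.eq_iff_iff]
  simp only [List.any_eq_true, Bool.and_eq_true, List.mem_range,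
    PySem.Str.isIn_iff_infix, PySem.Chars.startswith_iff, PySem.Set.contains_iff,
    String.toList_append, PySem.Int.toList_toStr]
  constructor
  · rintro ⟨t, ht, hinf⟩
    obtain ⟨i, hpre⟩ := (pv_infix_iff_exists_drop _ _).mp hinf
    obtain ⟨hpl, hid⟩ := (pv_append_prefix_iff _ _ _).mp hpre
    rw [pv_drop_player] at hid
    have hilt : i < s.length := by
      rcases Nat.lt_or_ge i s.length with h | h
      · exact h
      · exfalso
        rw [List.drop_eq_nil_of_le h] at hpre
        have := hpre.length_le
        simp at this
    refine ⟨i, hilt, hpl, PySem.Str.len (PySem.Int.toStr t), (hlenmem _).mpr ⟨t, ht, rfl⟩, ?_⟩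
    rw [hidmem]
    refine ⟨t, ht, String.toList_inj.mp ?_⟩
    rw [hslice i t, PySem.Int.toList_toStr]
    exact (List.prefix_iff_eq_take.mp hid).symm
  · rintro ⟨i, hilt, hpl, L, hL, hcont⟩
    obtain ⟨t, ht, heq⟩ := (hidmem _).mp hcont
    refine ⟨t, ht, (pv_infix_iff_exists_drop _ _).mpr ⟨i, (pv_append_prefix_iff _ _ _).mpr ⟨hpl, ?_⟩⟩⟩
    rw [pv_drop_player]
    obtain ⟨t', ht', rfl⟩ := (hlenmem _).mp hL
    have : (s.drop (i+7)).take (PySem.Int.toChars t').length = PySem.Int.toChars t := by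
      rw [← hslice i t', heq, PySem.Int.toList_toStr]
    rw [← this]
    exact List.take_prefix _ _

theorem should_filter_message_eq (message : String) (sender_id : Int)
    (teammate_ids : List Int) (opponents : List Int) :
    should_filter_message message sender_id teammate_ids opponents
      = should_filter_message_alt message sender_id teammate_ids opponents := by
  unfold should_filter_message should_filter_message_alt
  exact pv_key teammate_ids (PySem.Str.lower message)

-- ===== VERDICT (by name: the statement is the Claim_ definition above) =====
theorem should_filter_message_spec : Claim_equal_should_filter_message := by
  intro message sender_id teammate_ids opponents _
  unfold Spec_should_filter_message
  exact should_filter_message_eq message sender_id teammate_ids opponents
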